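-- pv_equiv track=rewrite | github.com/HyperionY/2022_PPS_CodingCamp | week3/A054_유정연_20220123.py | solution
-- ===== SOURCE A (Python) =====
-- def solution(board, moves):
--     answer = 0
--     w_size = len(board[0])
--     m = [[] for i in range(w_size)]
--     stack = []
--     board.reverse()
--
--     for w in board:
--         for i in range(0, w_size):
--             if not w[i] == 0:
--                 m[i].append(w[i])
--
--     for i in moves:
--         n = i - 1
--         if m[n]:
--             item = m[n].pop()
--             if stack and item == stack[-1]:
--                 stack.pop()
--                 answer += 2
--             else:
--                 stack.append(item)
--
--     return answer
-- ===== SOURCE B (Python) =====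
-- def solution(board, moves):
--     # Lazily scan each column top-down with a per-column pointer over the
--     # transposed board, instead of materialising per-column stacks up front.
--     answer = 0
--     stack = []
--     cols = list(zip(*board))
--     height = len(board)
--     ptr = [0] * len(cols)
--     for mv in moves:
--         c = mv - 1
--         col = cols[c]
--         p = ptr[c]
--         while p < height and col[p] == 0:
--             p += 1
--         if p < height:
--             ptr[c] = p + 1
--             item = col[p]
--             if stack and item == stack[-1]:
--                 stack.pop()
--                 answer += 2
--             else:
--                 stack.append(item)
--         else:
--             ptr[c] = p
--     return answer
-- ===== Notes on version B (the rewrite author's own statement) =====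
-- stated objective: alternative
-- what changed: B transposes the board once (zip) and keeps a per-column pointer that lazily scans each column top-down, skipping zeros, only when a move touches it, instead of A's eager construction of all per-column stacks; B also does not reverse the board argument in place, so the equivalence is about the return value.
import Mathlib
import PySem

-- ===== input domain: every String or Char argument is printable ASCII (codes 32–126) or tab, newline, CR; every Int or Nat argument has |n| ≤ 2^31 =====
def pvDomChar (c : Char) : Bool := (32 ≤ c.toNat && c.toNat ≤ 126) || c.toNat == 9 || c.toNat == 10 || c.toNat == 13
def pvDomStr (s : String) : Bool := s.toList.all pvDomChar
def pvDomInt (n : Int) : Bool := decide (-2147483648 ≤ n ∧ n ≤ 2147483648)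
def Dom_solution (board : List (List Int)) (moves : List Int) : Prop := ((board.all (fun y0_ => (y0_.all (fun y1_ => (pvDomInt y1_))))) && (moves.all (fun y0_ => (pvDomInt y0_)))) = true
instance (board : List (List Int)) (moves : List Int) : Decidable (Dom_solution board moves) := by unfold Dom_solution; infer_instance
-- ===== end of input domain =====

-- B replaces A's eager per-column stacks by a lazy per-column pointer scan over the
-- transposed board. A reverses its `board` argument in place and B does not mutate it;
-- the theorems below are about the RETURN value only.

-- ===== PORT A =====
-- inner body of A's fill loop: 'if not w[i] == 0: m[i].append(w[i])'
def solFillStep (row : List Int) (m : List (List Int)) (i : Int) : List (List Int) :=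
  if ¬ (PySem.List.pyGetD row i 0 = 0) then
    PySem.List.pySetD m i ((PySem.List.pyGetD m i []) ++ [PySem.List.pyGetD row i 0])
  else m

-- body of A's move loop (state = (answer, m, stack)); 'if m[n]: item = m[n].pop()' is the
-- none/some split of pop?, which is none exactly on the empty list
def solMoveStepA (st : Int × List (List Int) × List Int) (i : Int) : Int × List (List Int) × List Int :=
  let n := i - 1
  match PySem.List.pop? (PySem.List.pyGetD st.2.1 n []) (-1) with
  | none => st
  | some (item, col') =>
    let m' := PySem.List.pySetD st.2.1 n col'
    if st.2.2 ≠ [] ∧ item = PySem.List.pyGetD st.2.2 (-1) 0 then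
      (st.1 + 2, m', st.2.2.dropLast)
    else (st.1, m', st.2.2 ++ [item])

def solution (board : List (List Int)) (moves : List Int) : Int :=
  let w : Nat := (PySem.List.pyGetD board 0 []).length
  let rev := board.reverse
  let m : List (List Int) :=
    rev.foldl (fun m row => (PySem.List.pyRange 0 (w : Int) 1).foldl (solFillStep row) m)
      (List.replicate w [])
  (moves.foldl solMoveStepA (0, m, [])).1

-- ===== PORT B =====
-- 'list(zip(*rows))' ported by its specification: as many entries as the shortest row,
-- entry j collecting the j-th element of every row (exact on that index range).
def zipStar (rows : List (List Int)) : List (List Int) :=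
  match rows with
  | [] => []
  | r :: rs =>
    (List.range (rs.foldl (fun a t => min a t.length) r.length)).map
      (fun j => (r :: rs).map (fun t => t.getD j 0))

-- 'while p < height and col[p] == 0: p += 1'
def solScanB (col : List Int) (h : Nat) (p : Int) : Int :=
  if p < (h : Int) then
    if PySem.List.pyGetD col p 0 = 0 then solScanB col h (p + 1) else p
  else p
termination_by ((h : Int) - p).toNat
decreasing_by omega

-- body of B's move loop (state = (answer, ptr, stack))
def solMoveStepB (cols : List (List Int)) (h : Nat) (st : Int × List Int × List Int) (mv : Int) :
    Int × List Int × List Int :=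
  let c := mv - 1
  let col := PySem.List.pyGetD cols c []
  let p := solScanB col h (PySem.List.pyGetD st.2.1 c 0)
  if p < (h : Int) then
    let item := PySem.List.pyGetD col p 0
    let ptr' := PySem.List.pySetD st.2.1 c (p + 1)
    if st.2.2 ≠ [] ∧ item = PySem.List.pyGetD st.2.2 (-1) 0 then
      (st.1 + 2, ptr', st.2.2.dropLast)
    else (st.1, ptr', st.2.2 ++ [item])
  else (st.1, PySem.List.pySetD st.2.1 c p, st.2.2)

def solution_alt (board : List (List Int)) (moves : List Int) : Int :=
  let cols := zipStar board
  let h := board.length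
  (moves.foldl (solMoveStepB cols h) (0, List.replicate cols.length 0, [])).1

-- ===== PRECONDITION & SPEC =====
-- Pre_ is exactly A's return domain: A raises IndexError on an empty board (board[0]),
-- on a row shorter than board[0] (w[i] in the fill loop), and on a move i with i-1
-- outside [-w, w) (m[n] in the move loop).
def Pre_solution (board : List (List Int)) (moves : List Int) : Prop :=
  board ≠ [] ∧
  (∀ row ∈ board, (PySem.List.pyGetD board 0 []).length ≤ row.length) ∧
  (∀ mv ∈ moves, PySem.Raise.InRange (PySem.List.pyGetD board 0 []).length (mv - 1))
instance (board : List (List Int)) (moves : List Int) : Decidable (Pre_solution board moves) := by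
  unfold Pre_solution; infer_instance

def pvWitness_solution : List (List Int) × List Int :=
  ([[0, 3], [2, 5]], [1, 2, 1])

def Spec_solution (board : List (List Int)) (moves : List Int) (out : Int) : Prop := out = solution_alt board moves
instance (board : List (List Int)) (moves : List Int) (out : Int) : Decidable (Spec_solution board moves out) := by unfold Spec_solution; infer_instance

-- ===== CLAIM (what is proved, stated in full; the proofs are below) =====
def Claim_equal_solution : Prop := ∀ (board : List (List Int)) (moves : List Int), Dom_solution board moves → Pre_solution board moves → Spec_solution board moves (solution board moves)

-- ===== LEMMAS AND PROOFS =====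

def resolveIdx (len : Nat) (n : Int) : Nat := if n < 0 then (n + len).toNat else n.toNat

def delta (row : List Int) (c : Nat) : List Int :=
  if PySem.List.pyGetD row (c : Int) 0 = 0 then [] else [PySem.List.pyGetD row (c : Int) 0]

-- the c-th column of the (unreversed) board, top row first
def colOf (board : List (List Int)) (c : Nat) : List Int :=
  board.map (fun r => r.getD c 0)

-- what is still liftable from column `col` at pointer p (top-down)
def topRem (col : List Int) (p : Nat) : List Int :=
  (col.drop p).filter (fun x => decide (x ≠ 0))

theorem pyIdx?_resolve (len : Nat) (n : Int)
    (h0 : -(len : Int) ≤ n) (h1 : n < len) :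
    PySem.List.pyIdx? len n = some (resolveIdx len n) := by
  simp only [PySem.List.pyIdx?, resolveIdx]
  by_cases hn : n < 0
  · have e1 : ¬ (0 ≤ n) := by omega
    have e2 : len - (-n).toNat = (n + len).toNat := by omega
    simp [e1, hn, h0, e2]
  · have e1 : (0 ≤ n) := by omega
    simp [e1, hn, h1]

theorem pyGetD_resolve {α : Type} (xs : List α) (n : Int) (d : α)
    (h0 : -(xs.length : Int) ≤ n) (h1 : n < xs.length) :
    PySem.List.pyGetD xs n d = xs.getD (resolveIdx xs.length n) d := by
  simp [PySem.List.pyGetD, PySem.List.pyGet?, pyIdx?_resolve _ _ h0 h1, List.getD_eq_getElem?_getD]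

theorem pySetD_resolve {α : Type} (xs : List α) (n : Int) (v : α)
    (h0 : -(xs.length : Int) ≤ n) (h1 : n < xs.length) :
    PySem.List.pySetD xs n v = xs.set (resolveIdx xs.length n) v := by
  simp [PySem.List.pySetD, PySem.List.pySet?, pyIdx?_resolve _ _ h0 h1]

theorem resolveIdx_lt {len : Nat} {n : Int} (h0 : -(len : Int) ≤ n) (h1 : n < len) :
    resolveIdx len n < len := by
  unfold resolveIdx; split <;> omega

theorem fill_inner (row : List Int) (w : Nat) :
    ∀ (k : Nat), k ≤ w → ∀ (m : List (List Int)), m.length = w →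
      (((PySem.List.pyRange 0 (k : Int) 1).foldl (solFillStep row) m).length = w ∧
       ∀ c : Nat, c < w →
         ((PySem.List.pyRange 0 (k : Int) 1).foldl (solFillStep row) m).getD c [] =
           if c < k then m.getD c [] ++ delta row c else m.getD c []) := by
  intro k
  induction k with
  | zero => intro _ m hm; refine ⟨hm, ?_⟩; intro c hc; simp
  | succ k ih =>
    intro hk m hm
    have hk' : k ≤ w := by omega
    have hsplit : PySem.List.pyRange 0 ((k + 1 : Nat) : Int) 1
        = PySem.List.pyRange 0 (k : Int) 1 ++ [(k : Int)] := by
      push_cast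
      exact PySem.List.pyRange_one_succ_right (by omega)
    obtain ⟨hlen, hget⟩ := ih hk' m hm
    rw [hsplit, List.foldl_append]
    set G := (PySem.List.pyRange 0 (k : Int) 1).foldl (solFillStep row) m with hG
    have hklt : k < G.length := by omega
    constructor
    · simp only [List.foldl_cons, List.foldl_nil, solFillStep]
      simp only [PySem.List.pySetD_natCast]
      split
      · simp [hlen]
      · exact hlen
    · intro c hc
      simp only [List.foldl_cons, List.foldl_nil, solFillStep, PySem.List.pyGetD_natCast,
        PySem.List.pySetD_natCast]
      by_cases hv : row.getD k 0 = 0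
      · rw [if_neg (not_not_intro hv), hget c hc]
        by_cases h1 : c < k
        · simp [h1, show c < k + 1 by omega]
        · by_cases h2 : c < k + 1
          · have : c = k := by omega
            subst this
            rw [List.getD_eq_getElem?_getD] at hv
            simp [h2, delta, hv, List.getD_eq_getElem?_getD]
          · simp [h1, h2]
      · rw [if_pos hv, List.getD_eq_getElem?_getD, List.getElem?_set]
        by_cases hck : c = k
        · subst hck
          rw [if_pos rfl]
          simp only [hklt, if_pos, Option.getD_some]
          rw [hget c hc, if_neg (by omega : ¬ c < c)]
          rw [List.getD_eq_getElem?_getD] at hv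
          simp [delta, hv, List.getD_eq_getElem?_getD, show c < c + 1 by omega]
        · rw [if_neg (by omega), ← List.getD_eq_getElem?_getD, hget c hc]
          by_cases h1 : c < k
          · simp [h1, show c < k + 1 by omega]
          · simp [h1, show ¬ c < k + 1 by omega]

theorem fill_outer (w : Nat) (rs : List (List Int)) :
    ∀ (m : List (List Int)), m.length = w →
      ((rs.foldl (fun m row => (PySem.List.pyRange 0 (w : Int) 1).foldl (solFillStep row) m) m).length = w ∧
       ∀ c : Nat, c < w →
         (rs.foldl (fun m row => (PySem.List.pyRange 0 (w : Int) 1).foldl (solFillStep row) m) m).getD c [] =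
           m.getD c [] ++ rs.flatMap (fun row => delta row c)) := by
  induction rs with
  | nil => intro m hm; simp [hm]
  | cons r rs ih =>
    intro m hm
    obtain ⟨hlen1, hget1⟩ := fill_inner r w w (le_refl w) m hm
    obtain ⟨hlen2, hget2⟩ := ih _ hlen1
    refine ⟨hlen2, ?_⟩
    intro c hc
    simp only [List.foldl_cons, List.flatMap_cons]
    rw [hget2 c hc, hget1 c hc, if_pos hc, List.append_assoc]

-- A's initial column stack (built over the reversed board) is the reversed filtered column
theorem colA_eq (c : Nat) (bs : List (List Int)) :
    bs.reverse.flatMap (fun row => delta row c) = (topRem (colOf bs c) 0).reverse := by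
  induction bs with
  | nil => simp [topRem, colOf]
  | cons r rs ih =>
    rw [List.reverse_cons, List.flatMap_append, ih]
    simp only [List.flatMap_cons, List.flatMap_nil, List.append_nil, topRem, colOf,
      List.drop_zero, List.map_cons, List.filter_cons, delta, PySem.List.pyGetD_natCast,
      List.getD_eq_getElem?_getD]
    by_cases hv : r[c]?.getD 0 = 0
    · simp [hv]
    · simp [hv]

theorem getD_set_self {α : Type} (xs : List α) (c : Nat) (v d : α) (h : c < xs.length) :
    (xs.set c v).getD c d = v := by
  simp [List.getD_eq_getElem?_getD, h]

theorem getD_set_ne {α : Type} (xs : List α) (c c' : Nat) (v d : α) (h : c ≠ c') :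
    (xs.set c v).getD c' d = xs.getD c' d := by
  simp [List.getD_eq_getElem?_getD, h]

theorem pop?_nil : PySem.List.pop? ([] : List Int) (-1) = none := by decide

theorem foldl_min_ge (w : Nat) (rs : List (List Int)) (a : Nat)
    (ha : w ≤ a) (hrs : ∀ r ∈ rs, w ≤ r.length) :
    w ≤ rs.foldl (fun a t => min a t.length) a := by
  induction rs generalizing a with
  | nil => exact ha
  | cons r rs ih =>
    exact ih _ (le_min ha (hrs r (by simp))) (fun x hx => hrs x (by simp [hx]))

theorem foldl_min_le (rs : List (List Int)) (a : Nat) :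
    rs.foldl (fun a t => min a t.length) a ≤ a := by
  induction rs generalizing a with
  | nil => simp
  | cons r rs ih => exact le_trans (ih _) (min_le_left _ _)

-- under Pre_, zipStar board has exactly w columns and column c is colOf board c
theorem zipStar_spec (r0 : List Int) (rs : List (List Int))
    (hrows : ∀ row ∈ r0 :: rs, r0.length ≤ row.length) :
    (zipStar (r0 :: rs)).length = r0.length ∧
    ∀ c : Nat, c < r0.length → (zipStar (r0 :: rs)).getD c [] = colOf (r0 :: rs) c := by
  have hmin : rs.foldl (fun a t => min a t.length) r0.length = r0.length :=
    le_antisymm (foldl_min_le rs r0.length)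
      (foldl_min_ge r0.length rs r0.length (le_refl _) (fun r hr => hrows r (by simp [hr])))
  constructor
  · simp [zipStar, hmin]
  · intro c hc
    simp [zipStar, hmin, List.getD_eq_getElem?_getD, hc, colOf]

theorem length_colOf (bs : List (List Int)) (c : Nat) : (colOf bs c).length = bs.length := by
  simp [colOf]

theorem topRem_len (col : List Int) : topRem col col.length = [] := by
  simp [topRem]

theorem topRem_succ_zero (col : List Int) (p : Nat) (hp : p < col.length)
    (hv : col.getD p 0 = 0) : topRem col p = topRem col (p + 1) := by
  rw [topRem, List.drop_eq_getElem_cons hp, List.filter_cons]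
  rw [List.getD_eq_getElem?_getD, List.getElem?_eq_getElem hp] at hv
  simp at hv
  simp [hv, topRem]

theorem topRem_succ_pos (col : List Int) (p : Nat) (hp : p < col.length)
    (hv : ¬ col.getD p 0 = 0) : topRem col p = col.getD p 0 :: topRem col (p + 1) := by
  rw [List.getD_eq_getElem?_getD, List.getElem?_eq_getElem hp] at hv ⊢
  simp only [Option.getD_some] at hv ⊢
  rw [topRem, List.drop_eq_getElem_cons hp, List.filter_cons]
  simp [hv, topRem]

-- the while loop: finds the first nonzero entry of the column at or below p
theorem scan_spec (col : List Int) (h : Nat) (hlen : col.length = h) :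
    ∀ (k : Nat) (p : Nat), h - p ≤ k → p ≤ h →
      ∃ q : Nat, solScanB col h (p : Int) = (q : Int) ∧ p ≤ q ∧ q ≤ h ∧
        topRem col p = topRem col q ∧
        (q < h → ¬ col.getD q 0 = 0 ∧ topRem col q = col.getD q 0 :: topRem col (q + 1)) ∧
        (q = h → topRem col p = []) := by
  intro k
  induction k with
  | zero =>
    intro p hk hp
    have : p = h := by omega
    subst this
    rw [solScanB, if_neg (by omega)]
    exact ⟨p, rfl, le_refl _, le_refl _, rfl, fun hlt => absurd hlt (by omega),
      fun _ => by rw [← hlen]; exact topRem_len col⟩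
  | succ k ih =>
    intro p hk hp
    by_cases hph : p < h
    · rw [solScanB, if_pos (by omega), PySem.List.pyGetD_natCast]
      by_cases hv : col.getD p 0 = 0
      · rw [if_pos hv]
        have hcast : ((p : Int) + 1) = ((p + 1 : Nat) : Int) := by push_cast; ring
        rw [hcast]
        obtain ⟨q, e, h1, h2, h3, h4, h5⟩ := ih (p + 1) (by omega) (by omega)
        have hstep := topRem_succ_zero col p (by omega) hv
        exact ⟨q, e, by omega, h2, by rw [hstep]; exact h3, h4,
          fun hq => by rw [hstep]; exact h5 hq⟩
      · rw [if_neg hv]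
        exact ⟨p, rfl, le_refl _, by omega, rfl,
          fun _ => ⟨hv, topRem_succ_pos col p (by omega) hv⟩,
          fun hq => absurd hq (by omega)⟩
    · rw [solScanB, if_neg (by omega)]
      have : p = h := by omega
      subst this
      exact ⟨p, rfl, le_refl _, le_refl _, rfl, fun hlt => absurd hlt (by omega),
        fun _ => by rw [← hlen]; exact topRem_len col⟩

-- simulation invariant between A's remaining column stacks and B's pointers
def SimInv (board : List (List Int)) (w : Nat) (m : List (List Int)) (ptr : List Int) : Prop :=
  m.length = w ∧ ptr.length = w ∧
  ∀ c : Nat, c < w → ∃ p : Nat, ptr.getD c 0 = (p : Int) ∧ p ≤ board.length ∧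
    m.getD c [] = (topRem (colOf board c) p).reverse

theorem step_sim (board : List (List Int)) (w : Nat) (cols : List (List Int))
    (hclen : cols.length = w) (hcget : ∀ c : Nat, c < w → cols.getD c [] = colOf board c)
    (mv : Int) (hmv : PySem.Raise.InRange w (mv - 1)) (a : Int) (stack : List Int)
    (m : List (List Int)) (ptr : List Int) (h : SimInv board w m ptr) :
    (solMoveStepA (a, m, stack) mv).1 = (solMoveStepB cols board.length (a, ptr, stack) mv).1 ∧
    (solMoveStepA (a, m, stack) mv).2.2 = (solMoveStepB cols board.length (a, ptr, stack) mv).2.2 ∧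
    SimInv board w (solMoveStepA (a, m, stack) mv).2.1
      (solMoveStepB cols board.length (a, ptr, stack) mv).2.1 := by
  obtain ⟨hml, hpl, hinv⟩ := h
  have h1 : -(w : Int) ≤ mv - 1 := hmv.1
  have h2 : mv - 1 < (w : Int) := hmv.2
  set n := mv - 1 with hn
  set c := resolveIdx w n with hcdef
  have hc : c < w := resolveIdx_lt h1 h2
  obtain ⟨p, hptr, hple, hmc⟩ := hinv c hc
  have em : PySem.List.pyGetD m n [] = m.getD c [] := by
    rw [pyGetD_resolve m n [] (by rw [hml]; exact h1) (by rw [hml]; exact h2), hml]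
  have ecols : PySem.List.pyGetD cols n [] = colOf board c := by
    rw [pyGetD_resolve cols n [] (by rw [hclen]; exact h1) (by rw [hclen]; exact h2), hclen]
    exact hcget c hc
  have eptr : PySem.List.pyGetD ptr n 0 = (p : Int) := by
    rw [pyGetD_resolve ptr n 0 (by rw [hpl]; exact h1) (by rw [hpl]; exact h2), hpl]
    exact hptr
  obtain ⟨q, escan, hpq, hqle, hrem, hfound, hempty⟩ :=
    scan_spec (colOf board c) board.length (length_colOf board c)
      (board.length - p) p (le_refl _) hple
  simp only [solMoveStepA, solMoveStepB]
  rw [← hn, em, ecols, eptr, escan, hmc, hrem]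
  by_cases hq : q < board.length
  · obtain ⟨hnz, hcons⟩ := hfound hq
    rw [hcons, if_pos (by omega : (q : Int) < (board.length : Int))]
    simp only [List.reverse_cons]
    rw [PySem.List.pop?_last]
    dsimp only
    have eitem : PySem.List.pyGetD (colOf board c) (q : Int) 0 = (colOf board c).getD q 0 :=
      PySem.List.pyGetD_natCast _ _ _
    have esetm : PySem.List.pySetD m n (topRem (colOf board c) (q + 1)).reverse
        = m.set c (topRem (colOf board c) (q + 1)).reverse := by
      rw [pySetD_resolve m n _ (by rw [hml]; exact h1) (by rw [hml]; exact h2), hml]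
    have esetp : PySem.List.pySetD ptr n ((q : Int) + 1)
        = ptr.set c ((q : Int) + 1) := by
      rw [pySetD_resolve ptr n _ (by rw [hpl]; exact h1) (by rw [hpl]; exact h2), hpl]
    have hinv' : SimInv board w (m.set c (topRem (colOf board c) (q + 1)).reverse)
        (ptr.set c ((q : Int) + 1)) := by
      refine ⟨by simp [hml], by simp [hpl], ?_⟩
      intro c' hc'
      by_cases hcc : c = c'
      · subst hcc
        exact ⟨q + 1, by rw [getD_set_self ptr c _ 0 (by omega)]; push_cast; ring,
          by omega, by rw [getD_set_self m c _ [] (by omega)]⟩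
      · obtain ⟨p', e1, e2, e3⟩ := hinv c' hc'
        exact ⟨p', by rw [getD_set_ne ptr c c' _ 0 hcc]; exact e1, e2,
          by rw [getD_set_ne m c c' _ [] hcc]; exact e3⟩
    rw [esetm, esetp, eitem]
    by_cases hbr : stack ≠ [] ∧ (colOf board c).getD q 0 = PySem.List.pyGetD stack (-1) 0
    · rw [if_pos hbr, if_pos hbr]; exact ⟨rfl, rfl, hinv'⟩
    · rw [if_neg hbr, if_neg hbr]; exact ⟨rfl, rfl, hinv'⟩
  · have hqeq : q = board.length := by omega
    have : topRem (colOf board c) p = [] := hempty hqeq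
    rw [hrem] at this
    rw [this, if_neg (by omega : ¬ ((q : Int) < (board.length : Int)))]
    simp only [List.reverse_nil, pop?_nil]
    refine ⟨by trivial, by trivial, hml, ?_, ?_⟩
    · rw [pySetD_resolve ptr n _ (by rw [hpl]; exact h1) (by rw [hpl]; exact h2), hpl]
      simp [hpl]
    · intro c' hc'
      rw [pySetD_resolve ptr n _ (by rw [hpl]; exact h1) (by rw [hpl]; exact h2), hpl]
      by_cases hcc : c = c'
      · subst hcc
        refine ⟨q, by rw [getD_set_self ptr c _ 0 (by omega)], by omega, ?_⟩
        rw [hmc, hrem, hqeq, ← length_colOf board c, topRem_len]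
      · obtain ⟨p', e1, e2, e3⟩ := hinv c' hc'
        exact ⟨p', by rw [getD_set_ne ptr c c' _ 0 hcc]; exact e1, e2, e3⟩

theorem fold_sim (board : List (List Int)) (w : Nat) (cols : List (List Int))
    (hclen : cols.length = w) (hcget : ∀ c : Nat, c < w → cols.getD c [] = colOf board c) :
    ∀ (moves : List Int), (∀ mv ∈ moves, PySem.Raise.InRange w (mv - 1)) →
      ∀ (a : Int) (stack : List Int) (m : List (List Int)) (ptr : List Int),
        SimInv board w m ptr →
        (moves.foldl solMoveStepA (a, m, stack)).1
          = (moves.foldl (solMoveStepB cols board.length) (a, ptr, stack)).1 := by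
  intro moves
  induction moves with
  | nil => intro _ a stack m ptr _; rfl
  | cons mv t ih =>
    intro hmv a stack m ptr hinv
    obtain ⟨e1, e2, hinv'⟩ := step_sim board w cols hclen hcget mv (hmv mv (by simp))
      a stack m ptr hinv
    simp only [List.foldl_cons]
    have := ih (fun x hx => hmv x (by simp [hx]))
      (solMoveStepA (a, m, stack) mv).1 (solMoveStepA (a, m, stack) mv).2.2
      (solMoveStepA (a, m, stack) mv).2.1 (solMoveStepB cols board.length (a, ptr, stack) mv).2.1 hinv'
    rw [show ((solMoveStepA (a, m, stack) mv).1, (solMoveStepA (a, m, stack) mv).2.1,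
          (solMoveStepA (a, m, stack) mv).2.2) = solMoveStepA (a, m, stack) mv from rfl] at this
    rw [e1, e2] at this
    rw [show ((solMoveStepB cols board.length (a, ptr, stack) mv).1,
          (solMoveStepB cols board.length (a, ptr, stack) mv).2.1,
          (solMoveStepB cols board.length (a, ptr, stack) mv).2.2)
        = solMoveStepB cols board.length (a, ptr, stack) mv from rfl] at this
    exact this

theorem getD_replicate' {α : Type} (w c : Nat) (v d : α) (hc : c < w) :
    (List.replicate w v).getD c d = v := by
  simp [List.getD_eq_getElem?_getD, hc]

-- ===== VERDICT (by name: the statement is the Claim_ definition above) =====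
theorem solution_spec : Claim_equal_solution := by
  intro board moves _hdom hpre
  obtain ⟨hne, hrows, hmoves⟩ := hpre
  cases board with
  | nil => exact absurd rfl hne
  | cons r0 rs =>
    have hr0 : PySem.List.pyGetD (r0 :: rs) 0 [] = r0 := by
      rw [show (0 : Int) = ((0 : Nat) : Int) from rfl, PySem.List.pyGetD_natCast]; rfl
    rw [hr0] at hrows hmoves
    simp only [Spec_solution, solution, solution_alt, hr0]
    obtain ⟨hclen, hcget⟩ := zipStar_spec r0 rs hrows
    rw [hclen]
    obtain ⟨hmlen, hmget⟩ := fill_outer r0.length (r0 :: rs).reverse (List.replicate r0.length [])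
      (by simp)
    apply fold_sim (r0 :: rs) r0.length (zipStar (r0 :: rs)) hclen hcget moves hmoves
    refine ⟨hmlen, by simp, ?_⟩
    intro c hc
    refine ⟨0, by rw [getD_replicate' _ c _ 0 hc]; rfl, by omega, ?_⟩
    rw [hmget c hc, getD_replicate' _ c ([] : List Int) [] hc, List.nil_append, colA_eq]
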